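-- pv_equiv track=rewrite | github.com/Dennp333/Tic-Tac-Toe | tic-tac-toe.py | chooseMin
-- ===== SOURCE A (Python) =====
-- def chooseMin(values):
--     scores = []
--     depths = []
--     minScorers = []
--     for i in range(len(values)):
--         scores.append(values[i][0])
--         depths.append(values[i][1])
--     minScore = min(scores)
--     for i in range(len(scores)):
--         if scores[i] == minScore:
--             minScorers.append(depths[i])
--     return [minScore, max(minScorers)]
-- ===== SOURCE B (Python) =====
-- def chooseMin(values):
--     bestScore = None
--     bestDepth = None
--     for s, d in values:
--         if bestScore is None or s < bestScore:
--             bestScore, bestDepth = s, d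
--         elif s == bestScore and d > bestDepth:
--             bestDepth = d
--     if bestScore is None:
--         raise ValueError("chooseMin() arg is an empty sequence")
--     return [bestScore, bestDepth]
-- ===== Notes on version B (the rewrite author's own statement) =====
-- stated objective: simpler
-- what changed: Replaces A's three materialized lists (scores, depths, minScorers) and three passes (build, min, filter+max) by a single pass keeping a running best score and best depth.
-- outside the precondition, e.g. on chooseMin([]): A raises ValueError, B raises ValueError
import Mathlib
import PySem

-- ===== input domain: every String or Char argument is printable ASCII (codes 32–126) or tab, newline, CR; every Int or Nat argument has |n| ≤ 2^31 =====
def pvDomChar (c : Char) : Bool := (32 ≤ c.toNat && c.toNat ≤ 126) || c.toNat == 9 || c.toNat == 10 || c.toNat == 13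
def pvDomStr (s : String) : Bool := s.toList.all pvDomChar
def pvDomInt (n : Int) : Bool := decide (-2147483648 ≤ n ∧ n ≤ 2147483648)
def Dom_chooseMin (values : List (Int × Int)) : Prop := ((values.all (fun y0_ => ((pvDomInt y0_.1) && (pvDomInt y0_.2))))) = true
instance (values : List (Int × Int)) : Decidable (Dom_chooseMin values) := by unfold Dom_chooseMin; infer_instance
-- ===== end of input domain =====

-- B replaces A's three lists and three passes by a single pass with a running best score/depth (objective: simpler).


-- ===== PORT A =====
def chooseMin (values : List (Int × Int)) : List Int :=
  let scores := values.foldl (fun acc v => acc ++ [v.1]) []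
  let depths := values.foldl (fun acc v => acc ++ [v.2]) []
  match PySem.List.min? scores (fun y => y) with
  | none => []   -- min([]) raises ValueError; excluded by Pre_
  | some minScore =>
      let minScorers := (PySem.List.pyRange 0 (PySem.List.len scores)).foldl
        (fun acc i => if PySem.List.pyGetD scores i 0 == minScore
                      then acc ++ [PySem.List.pyGetD depths i 0] else acc) []
      -- indices from range(len(scores)) are always in range, so pyGetD is exact here
      match PySem.List.max? minScorers (fun y => y) with
      | none => []
      | some m => [minScore, m]

-- ===== PORT B =====
def chooseMinGo : List (Int × Int) → Int → Int → List Int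
  | [], s, d => [s, d]
  | (s', d') :: rest, s, d =>
      if s' < s then chooseMinGo rest s' d'
      else if s' == s then chooseMinGo rest s (if d' > d then d' else d)
      else chooseMinGo rest s d

def chooseMin_alt (values : List (Int × Int)) : List Int :=
  match values with
  | [] => []   -- Python B raises ValueError here; excluded by Pre_
  | (s, d) :: rest => chooseMinGo rest s d

-- ===== PRECONDITION & SPEC =====
-- A calls min([]) on the empty list and raises ValueError there (B raises too); Pre_ excludes it.
def Pre_chooseMin (values : List (Int × Int)) : Prop := values ≠ []
instance (values : List (Int × Int)) : Decidable (Pre_chooseMin values) := by unfold Pre_chooseMin; infer_instance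
def pvWitness_chooseMin : (List (Int × Int)) := [(1, 2), (0, 3)]
def Spec_chooseMin (values : List (Int × Int)) (out : List Int) : Prop := out = chooseMin_alt values
instance (values : List (Int × Int)) (out : List Int) : Decidable (Spec_chooseMin values out) := by unfold Spec_chooseMin; infer_instance

-- ===== CLAIM (what is proved, stated in full; the proofs are below) =====
def Claim_equal_chooseMin : Prop := ∀ (values : List (Int × Int)), Dom_chooseMin values → Pre_chooseMin values → Spec_chooseMin values (chooseMin values)

-- ===== LEMMAS AND PROOFS =====

-- max of a nonempty list (head as starting accumulator); 0 is a dummy for []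
def lmax1 : List Int → Int
  | [] => 0
  | x :: t => t.foldl max x

-- running minimum of the first components, seeded with s
def mfold (l : List (Int × Int)) (s : Int) : Int := l.foldl (fun a v => min a v.1) s

theorem mfold_le (l : List (Int × Int)) : ∀ s : Int, mfold l s ≤ s := by
  induction l with
  | nil => intro s; simp [mfold]
  | cons v r ih =>
      intro s
      have h := ih (min s v.1)
      simp only [mfold, List.foldl_cons] at h ⊢
      exact le_trans h (min_le_left _ _)

-- the single-pass loop computes the overall min and the max depth among its achievers
theorem go_spec (l : List (Int × Int)) : ∀ s d : Int,
    chooseMinGo l s d =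
      [mfold l s,
       lmax1 ((if s == mfold l s then [d] else []) ++
              (l.filter (fun v => v.1 == mfold l s)).map Prod.snd)] := by
  induction l with
  | nil => intro s d; simp [chooseMinGo, mfold, lmax1]
  | cons v r ih =>
      intro s d
      obtain ⟨s', d'⟩ := v
      have hm : mfold ((s', d') :: r) s = mfold r (min s s') := rfl
      simp only [chooseMinGo, hm, List.filter_cons]
      rcases lt_trichotomy s' s with hlt | heq | hgt
      · -- new strict minimum so far: reset both
        have hmin : min s s' = s' := by omega
        rw [if_pos hlt, hmin, ih s' d']
        have hs : ((s == mfold r s') : Bool) = false := by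
          have := mfold_le r s'
          simp only [beq_eq_false_iff_ne, ne_eq]
          omega
        simp only [hs, Bool.false_eq_true, if_false, List.nil_append]
        split_ifs with hh <;> simp
      · -- equal score: keep score, bump depth
        subst heq
        rw [if_neg (by omega : ¬ s' < s'), if_pos (by simp), min_self, ih s' (if d' > d then d' else d)]
        rcases hb : ((s' == mfold r s') : Bool) with _ | _
        · simp
        · have hmax : ∀ t : List Int, t.foldl max (if d' > d then d' else d) = (d' :: t).foldl max d := by
            intro t
            have hmd : (if d' > d then d' else d) = max d d' := by omega
            simp [List.foldl_cons, hmd]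
          simp [lmax1, hmax]
      · -- larger score: ignore
        have hmin : min s s' = s := by omega
        have hs' : ((s' == mfold r s) : Bool) = false := by
          have := mfold_le r s
          simp only [beq_eq_false_iff_ne, ne_eq]
          omega
        rw [if_neg (by omega : ¬ s' < s), if_neg (by simp; omega : ¬ (s' == s) = true), hmin, ih s d]
        simp [hs']

-- pyGetD on the two mapped lists reads the underlying pair (specializations of PySem.List.pyGetD_map)
theorem getD_fst (values : List (Int × Int)) (i : Int) :
    PySem.List.pyGetD (values.map Prod.fst) i 0 = (PySem.List.pyGetD values i ((0 : Int), (0 : Int))).1 :=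
  PySem.List.pyGetD_map Prod.fst values i ((0 : Int), (0 : Int))

theorem getD_snd (values : List (Int × Int)) (i : Int) :
    PySem.List.pyGetD (values.map Prod.snd) i 0 = (PySem.List.pyGetD values i ((0 : Int), (0 : Int))).2 :=
  PySem.List.pyGetD_map Prod.snd values i ((0 : Int), (0 : Int))

theorem chooseMin_spec : Claim_equal_chooseMin := by
  unfold Claim_equal_chooseMin
  intro values _ hpre
  unfold Spec_chooseMin Pre_chooseMin at *
  obtain _ | ⟨⟨a, b⟩, rest⟩ := values
  · exact absurd rfl hpre
  -- A side
  have hscores : ((a, b) :: rest).foldl (fun acc (v : Int × Int) => acc ++ [v.1]) [] =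
      ((a, b) :: rest).map Prod.fst := by
    simpa using PySem.List.foldl_append_singleton_eq_map Prod.fst ((a, b) :: rest) []
  have hdepths : ((a, b) :: rest).foldl (fun acc (v : Int × Int) => acc ++ [v.2]) [] =
      ((a, b) :: rest).map Prod.snd := by
    simpa using PySem.List.foldl_append_singleton_eq_map Prod.snd ((a, b) :: rest) []
  set M : Int := mfold rest a with hM
  have hmin : PySem.List.min? (((a, b) :: rest).map Prod.fst) (fun y => y) = some M := by
    rw [List.map_cons, PySem.List.min?_id_cons]
    congr 1
    rw [List.foldl_map]
    rfl
  have hloop : (PySem.List.pyRange 0 (PySem.List.len (((a, b) :: rest).map Prod.fst))).foldl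
      (fun acc i => if PySem.List.pyGetD (((a, b) :: rest).map Prod.fst) i 0 == M
                    then acc ++ [PySem.List.pyGetD (((a, b) :: rest).map Prod.snd) i 0] else acc) [] =
      (((a, b) :: rest).filter (fun v => v.1 == M)).map Prod.snd := by
    have h1 : ∀ acc : List Int, ∀ i : Int,
        (if PySem.List.pyGetD (((a, b) :: rest).map Prod.fst) i 0 == M
         then acc ++ [PySem.List.pyGetD (((a, b) :: rest).map Prod.snd) i 0] else acc) =
        (if (PySem.List.pyGetD ((a, b) :: rest) i ((0 : Int), (0 : Int))).1 == M
         then acc ++ [(PySem.List.pyGetD ((a, b) :: rest) i ((0 : Int), (0 : Int))).2] else acc) := by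
      intro acc i; rw [getD_fst, getD_snd]
    calc (PySem.List.pyRange 0 (PySem.List.len (((a, b) :: rest).map Prod.fst))).foldl
          (fun acc i => if PySem.List.pyGetD (((a, b) :: rest).map Prod.fst) i 0 == M
                        then acc ++ [PySem.List.pyGetD (((a, b) :: rest).map Prod.snd) i 0] else acc) []
        = (PySem.List.pyRange 0 (((a, b) :: rest).length : Int)).foldl
          (fun acc i => if (PySem.List.pyGetD ((a, b) :: rest) i ((0 : Int), (0 : Int))).1 == M
            then acc ++ [(PySem.List.pyGetD ((a, b) :: rest) i ((0 : Int), (0 : Int))).2] else acc) [] := by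
          simp only [h1, PySem.List.len, List.length_map]
      _ = ((a, b) :: rest).foldl
            (fun (acc : List Int) (v : Int × Int) => if v.1 == M then acc ++ [v.2] else acc) [] :=
          PySem.List.foldl_pyRange_zero_pyGetD' ((a, b) :: rest) ((0 : Int), (0 : Int))
            (fun acc v => if v.1 == M then acc ++ [v.2] else acc) []
      _ = (((a, b) :: rest).filter (fun v => v.1 == M)).map Prod.snd := by
          simpa using PySem.List.foldl_append_if (fun (v : Int × Int) => v.1 == M) Prod.snd ((a, b) :: rest) []
  -- the filtered list is nonempty: M occurs among the first components
  have hmem : M ∈ ((a, b) :: rest).map Prod.fst := PySem.List.min?_mem hmin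
  obtain ⟨x, hx, hx1⟩ := List.mem_map.mp hmem
  have hne : (((a, b) :: rest).filter (fun v => v.1 == M)) ≠ [] := by
    intro hnil
    have : x ∈ ((a, b) :: rest).filter (fun v => v.1 == M) :=
      List.mem_filter.mpr ⟨hx, by simp [hx1]⟩
    simp [hnil] at this
  obtain ⟨w, ws, hws⟩ := List.exists_cons_of_ne_nil hne
  have hA : chooseMin ((a, b) :: rest) =
      [M, lmax1 ((((a, b) :: rest).filter (fun v => v.1 == M)).map Prod.snd)] := by
    simp only [chooseMin, hscores, hdepths, hmin]
    simp only [hloop]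
    rw [hws]
    simp [lmax1, PySem.List.max?_id_cons]
  -- B side
  have hB : chooseMin_alt ((a, b) :: rest) =
      [M, lmax1 ((((a, b) :: rest).filter (fun v => v.1 == M)).map Prod.snd)] := by
    have halt : chooseMin_alt ((a, b) :: rest) = chooseMinGo rest a b := rfl
    rw [halt, go_spec rest a b]
    have hm' : mfold rest a = M := rfl
    rw [hm']
    congr 1
    · congr 1
      rw [List.filter_cons]
      by_cases hh : a = M <;> simp [hh]
  rw [hA, hB]
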